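-- pv_equiv track=rewrite | github.com/101485895/TermProject | combat.py | attack_categories
-- ===== SOURCE A (Python) =====
-- def attack_categories(hero_attacks):
--     # Different arrays for different spell types for submenus
--     # Attacks > Fire Spells > Displays all fire spells etc
--     general = []
--     fire_spells = []
--     water_spells = []
--     lightning_spells = []
--     for attack in hero_attacks: # Assumes that all spells will follow a standard naming convention (element + type)
--         if 'Fire' in attack:
--             fire_spells.append(attack)
--         elif 'Water' in attack:
--             water_spells.append(attack)
--         elif 'Lightning' in attack:
--             lightning_spells.append(attack)
--         else:
--             general.append(attack)
--     return general, fire_spells, water_spells, lightning_spells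
-- ===== SOURCE B (Python) =====
-- def attack_categories(hero_attacks):
--     # Four independent filtering passes, one per category, instead of one
--     # dispatching loop; exclusion guards reproduce the Fire>Water>Lightning priority.
--     fire_spells = [a for a in hero_attacks if 'Fire' in a]
--     water_spells = [a for a in hero_attacks if 'Water' in a and 'Fire' not in a]
--     lightning_spells = [a for a in hero_attacks
--                         if 'Lightning' in a and 'Fire' not in a and 'Water' not in a]
--     general = [a for a in hero_attacks
--                if 'Fire' not in a and 'Water' not in a and 'Lightning' not in a]
--     return general, fire_spells, water_spells, lightning_spells
-- ===== Notes on version B (the rewrite author's own statement) =====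
-- stated objective: alternative
-- what changed: Replaces the single dispatching loop with accumulators by four independent filtering passes over hero_attacks, one comprehension per category, with exclusion guards encoding the Fire>Water>Lightning priority.
import Mathlib
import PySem

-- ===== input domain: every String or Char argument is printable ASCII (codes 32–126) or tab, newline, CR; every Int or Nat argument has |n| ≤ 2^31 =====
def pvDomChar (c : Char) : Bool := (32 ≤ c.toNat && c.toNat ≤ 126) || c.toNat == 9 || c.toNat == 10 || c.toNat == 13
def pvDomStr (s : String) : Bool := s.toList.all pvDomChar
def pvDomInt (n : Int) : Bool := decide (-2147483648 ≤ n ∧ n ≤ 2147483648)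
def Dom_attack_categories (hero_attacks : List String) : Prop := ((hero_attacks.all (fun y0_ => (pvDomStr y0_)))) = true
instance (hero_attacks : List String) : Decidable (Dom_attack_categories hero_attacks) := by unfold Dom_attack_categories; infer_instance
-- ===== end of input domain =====

-- ===== PORT A =====
-- Port of A: one fold over hero_attacks dispatching each attack to one of four accumulators.
-- acStep is the loop body (one iteration of A's for-loop).
def acStep (st : List String × List String × List String × List String) (attack : String) :
    List String × List String × List String × List String :=
  let (general, fire_spells, water_spells, lightning_spells) := st
  if PySem.Str.isIn "Fire" attack then
    (general, fire_spells ++ [attack], water_spells, lightning_spells)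
  else if PySem.Str.isIn "Water" attack then
    (general, fire_spells, water_spells ++ [attack], lightning_spells)
  else if PySem.Str.isIn "Lightning" attack then
    (general, fire_spells, water_spells, lightning_spells ++ [attack])
  else
    (general ++ [attack], fire_spells, water_spells, lightning_spells)

def attack_categories (hero_attacks : List String) : List String × List String × List String × List String :=
  hero_attacks.foldl acStep ([], [], [], [])

-- ===== PORT B =====
-- Port of B: four independent filtering passes, one per category.
def attack_categories_alt (hero_attacks : List String) : List String × List String × List String × List String :=
  let fire_spells := hero_attacks.filter (fun a => PySem.Str.isIn "Fire" a)
  let water_spells := hero_attacks.filter (fun a =>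
    PySem.Str.isIn "Water" a && !PySem.Str.isIn "Fire" a)
  let lightning_spells := hero_attacks.filter (fun a =>
    PySem.Str.isIn "Lightning" a && !PySem.Str.isIn "Fire" a && !PySem.Str.isIn "Water" a)
  let general := hero_attacks.filter (fun a =>
    !PySem.Str.isIn "Fire" a && !PySem.Str.isIn "Water" a && !PySem.Str.isIn "Lightning" a)
  (general, fire_spells, water_spells, lightning_spells)

-- ===== PRECONDITION & SPEC =====
def Spec_attack_categories (hero_attacks : List String) (out : List String × List String × List String × List String) : Prop := out = attack_categories_alt hero_attacks
instance (hero_attacks : List String) (out : List String × List String × List String × List String) : Decidable (Spec_attack_categories hero_attacks out) := by unfold Spec_attack_categories; infer_instance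

-- ===== CLAIM (what is proved, stated in full; the proofs are below) =====
def Claim_equal_attack_categories : Prop := ∀ (hero_attacks : List String), Dom_attack_categories hero_attacks → Spec_attack_categories hero_attacks (attack_categories hero_attacks)

-- ===== LEMMAS AND PROOFS =====

-- ===== VERDICT (by name: the statement is the Claim_ definition above) =====
lemma attack_fold_inv (xs : List String) (g f w l : List String) :
    xs.foldl acStep (g, f, w, l)
    = (g ++ xs.filter (fun a =>
        !PySem.Str.isIn "Fire" a && !PySem.Str.isIn "Water" a && !PySem.Str.isIn "Lightning" a),
       f ++ xs.filter (fun a => PySem.Str.isIn "Fire" a),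
       w ++ xs.filter (fun a => PySem.Str.isIn "Water" a && !PySem.Str.isIn "Fire" a),
       l ++ xs.filter (fun a =>
        PySem.Str.isIn "Lightning" a && !PySem.Str.isIn "Fire" a && !PySem.Str.isIn "Water" a)) := by
  induction xs generalizing g f w l with
  | nil => simp
  | cons x xs ih =>
    simp only [List.foldl_cons, List.filter_cons, acStep]
    by_cases hF : PySem.Str.isIn "Fire" x = true <;>
      by_cases hW : PySem.Str.isIn "Water" x = true <;>
        by_cases hL : PySem.Str.isIn "Lightning" x = true <;>
          simp only [hF, hW, hL, if_true, Bool.not_true, Bool.not_false,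
            Bool.and_false, Bool.and_true, ih] <;>
          simp [List.append_assoc]

theorem attack_categories_spec : Claim_equal_attack_categories := by
  intro xs _
  unfold Spec_attack_categories attack_categories attack_categories_alt
  simp only [attack_fold_inv, List.nil_append]
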